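-- pv_equiv track=rewrite | github.com/edmondchuc/LODE3 | toolkit.py | extract_property_name_from_uri
-- ===== SOURCE A (Python) =====
-- def extract_property_name_from_uri(s, label=None):
--     """
--     Extract the property name of a URI. Returns a tuple where [0] is the property name with no space and [1] is the
--     property name with a &nbsp space.
--
--     :param s: A URI.
--     :type s: str
--     :return: The property name as a tuple (name from URI as is, name where multiple words are separated by space)
--     :rtype: tuple
--     """
--     property_name = str(s)  # cast to str
--     # split on '#' if it exists, then on '/' and grab the last token
--     property_name = property_name.split('#')[-1].split('/')[-1]
--
--     # split the property_name if it is in camelCase or PascalCase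
--     full_name = []
--     previous = 0
--     for i, letter in enumerate(property_name):
--         if letter.isupper():
--             full_name.append(property_name[previous:i])
--             previous = i
--     full_name.append(property_name[previous:])
--
--     if label == None:
--         property_name = (property_name, ''.join(full_name)) # return a tuple (no-spaced, human-readable spaced)
--     else:
--         property_name = (property_name, label)
--     return property_name
-- ===== SOURCE B (Python) =====
-- def extract_property_name_from_uri(s, label=None):
--     name = str(s).split('#')[-1].split('/')[-1]
--     return (name, name) if label is None else (name, label)
-- ===== Notes on version B (the rewrite author's own statement) =====
-- stated objective: simpler
-- what changed: A's per-character camelCase loop slices the name at every uppercase letter and then joins the contiguous slices back with an empty separator, which always rebuilds the original name unchanged; B drops the loop entirely and returns the split-off last token directly.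
import Mathlib
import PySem

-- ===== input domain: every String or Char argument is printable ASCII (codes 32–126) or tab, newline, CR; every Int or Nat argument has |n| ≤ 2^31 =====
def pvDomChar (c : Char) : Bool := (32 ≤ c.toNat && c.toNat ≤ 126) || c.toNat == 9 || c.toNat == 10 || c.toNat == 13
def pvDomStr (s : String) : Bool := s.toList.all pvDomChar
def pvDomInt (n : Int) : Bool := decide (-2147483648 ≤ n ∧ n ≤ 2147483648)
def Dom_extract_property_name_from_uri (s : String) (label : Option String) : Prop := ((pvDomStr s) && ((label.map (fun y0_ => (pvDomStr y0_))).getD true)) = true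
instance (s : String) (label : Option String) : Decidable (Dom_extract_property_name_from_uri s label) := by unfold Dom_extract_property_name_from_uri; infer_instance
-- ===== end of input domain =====

-- B drops A's camelCase loop (whose ''.join of contiguous slices always rebuilds the
-- original name, as no separator is ever inserted) and returns the last split token directly.

-- ===== PORT A =====
-- one step of A's `for i, letter in enumerate(property_name)` loop; state = (full_name, previous)
def pvStepA (cs : List Char) (st : List (List Char) × Int) (p : Int × Char) : List (List Char) × Int :=
  if PySem.Chars.isupper p.2 then (st.1 ++ [PySem.List.slice cs (some st.2) (some p.1)], p.1) else st

def extract_property_name_from_uri (s : String) (label : Option String) : String × String :=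
  -- property_name = str(s).split('#')[-1].split('/')[-1]  ([-1] of split's always-nonempty list = last)
  let cs1 := (PySem.Chars.splitOn s.toList ['#']).getLastD []
  let cs := (PySem.Chars.splitOn cs1 ['/']).getLastD []
  -- full_name = []; previous = 0; for i, letter in enumerate(property_name): ...
  let st := (PySem.List.enumerate cs 0).foldl (pvStepA cs) ([], 0)
  -- full_name.append(property_name[previous:])
  let full := st.1 ++ [PySem.List.slice cs (some st.2) none]
  match label with
  | none => (String.ofList cs, String.ofList (PySem.Chars.join [] full))
  | some l => (String.ofList cs, l)

-- ===== PORT B =====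
def extract_property_name_from_uri_alt (s : String) (label : Option String) : String × String :=
  let name := String.ofList
    ((PySem.Chars.splitOn ((PySem.Chars.splitOn s.toList ['#']).getLastD []) ['/']).getLastD [])
  match label with
  | none => (name, name)
  | some l => (name, l)

-- ===== PRECONDITION & SPEC =====
def Spec_extract_property_name_from_uri (s : String) (label : Option String) (out : String × String) : Prop := out = extract_property_name_from_uri_alt s label
instance (s : String) (label : Option String) (out : String × String) : Decidable (Spec_extract_property_name_from_uri s label out) := by unfold Spec_extract_property_name_from_uri; infer_instance

-- ===== CLAIM (what is proved, stated in full; the proofs are below) =====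
def Claim_equal_extract_property_name_from_uri : Prop := ∀ (s : String) (label : Option String), Dom_extract_property_name_from_uri s label → Spec_extract_property_name_from_uri s label (extract_property_name_from_uri s label)

-- ===== LEMMAS AND PROOFS =====

-- ''.join(A ++ [x]) = ''.join(A) ++ x
lemma pv_join_append_singleton (A : List (List Char)) (x : List Char) :
    PySem.Chars.join [] (A ++ [x]) = PySem.Chars.join [] A ++ x := by
  induction A with
  | nil => simp [PySem.Chars.join_singleton, PySem.Chars.join_nil]
  | cons a A ih =>
      cases A with
      | nil => simp [PySem.Chars.join_cons_cons, PySem.Chars.join_singleton]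
      | cons b B =>
          simp only [List.cons_append, PySem.Chars.join_cons_cons] at ih ⊢
          simp [ih]

-- loop invariant: after the fold, the pieces joined give cs.take q where q is the new `previous`
lemma pv_loopA_inv (cs : List Char) : ∀ (l : List Char) (sIdx : Nat) (acc : List (List Char)) (prev : Nat),
    prev ≤ sIdx → PySem.Chars.join [] acc = cs.take prev →
    ∃ (A : List (List Char)) (q : Nat),
      (PySem.List.enumerate l (sIdx : Int)).foldl (pvStepA cs) (acc, (prev : Int)) = (A, (q : Int)) ∧
      PySem.Chars.join [] A = cs.take q := by
  intro l
  induction l with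
  | nil => intro sIdx acc prev _ hacc; exact ⟨acc, prev, by simp [PySem.List.enumerate], hacc⟩
  | cons c l ih =>
      intro sIdx acc prev hle hacc
      rw [PySem.List.enumerate_cons]
      simp only [List.foldl_cons]
      by_cases hc : PySem.Chars.isupper c
      · have hstep : pvStepA cs (acc, (prev : Int)) ((sIdx : Int), c)
            = (acc ++ [PySem.List.slice cs (some (prev : Int)) (some (sIdx : Int))], (sIdx : Int)) := by
          simp [pvStepA, hc]
        rw [hstep]
        have hjoin : PySem.Chars.join [] (acc ++ [PySem.List.slice cs (some (prev : Int)) (some (sIdx : Int))])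
            = cs.take sIdx := by
          rw [pv_join_append_singleton, hacc, PySem.List.slice_natCast]
          rw [← List.take_append_drop prev (cs.take sIdx)]
          congr 1
          · rw [List.take_take, Nat.min_eq_left hle]
          · rw [List.drop_take]
        have : ((sIdx : Int) + 1) = ((sIdx + 1 : Nat) : Int) := by push_cast; ring
        rw [this]
        exact ih (sIdx + 1) _ sIdx (Nat.le_succ _) hjoin
      · have hstep : pvStepA cs (acc, (prev : Int)) ((sIdx : Int), c) = (acc, (prev : Int)) := by
          simp [pvStepA, hc]
        rw [hstep]
        have : ((sIdx : Int) + 1) = ((sIdx + 1 : Nat) : Int) := by push_cast; ring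
        rw [this]
        exact ih (sIdx + 1) acc prev (Nat.le_succ_of_le hle) hacc

-- A's whole camelCase pass rebuilds the name unchanged
lemma pv_loopA_id (cs : List Char) :
    PySem.Chars.join []
      (((PySem.List.enumerate cs 0).foldl (pvStepA cs) ([], 0)).1 ++
        [PySem.List.slice cs (some (((PySem.List.enumerate cs 0).foldl (pvStepA cs) ([], 0)).2)) none]) = cs := by
  obtain ⟨A, q, heq, hjoin⟩ := pv_loopA_inv cs cs 0 [] 0 (Nat.le_refl 0) (by simp [PySem.Chars.join_nil])
  have h0 : ((0 : Nat) : Int) = (0 : Int) := by norm_num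
  rw [← h0, heq]
  simp only
  rw [pv_join_append_singleton, hjoin,
      PySem.List.slice_from cs (by exact_mod_cast Nat.zero_le q)]
  simp [List.take_append_drop]

-- ===== VERDICT (by name: the statement is the Claim_ definition above) =====
theorem extract_property_name_from_uri_spec : Claim_equal_extract_property_name_from_uri := by
  intro s label _
  unfold Spec_extract_property_name_from_uri extract_property_name_from_uri extract_property_name_from_uri_alt
  cases label with
  | some l => rfl
  | none =>
      simp only
      rw [pv_loopA_id]
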